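-- pv_equiv track=rewrite | github.com/Prsnkmr231/DSA | 6_Array_Problems/Easy/12_find_element_that_appears_once.py | find_element_appears_once
-- ===== SOURCE A (Python) =====
-- def find_element_appears_once(arr,number):
--     for i in range(5):
--         counter = 0
--         for j in range(len(arr)):
--             if i==arr[j]:
--                 counter+=1
--
--         if counter==1:
--             return i
-- ===== SOURCE B (Python) =====
-- def find_element_appears_once(arr, number):
--     # Sort, then scan runs of equal values with two index pointers: in
--     # sorted order, the first run of length 1 whose value lies in 0..4 is
--     # the smallest value in 0..4 occurring exactly once, which is what
--     # the task asks for.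
--     s = sorted(arr)
--     n = len(s)
--     i = 0
--     while i < n:
--         j = i + 1
--         while j < n and s[j] == s[i]:
--             j += 1
--         if j == i + 1 and 0 <= s[i] <= 4:
--             return s[i]
--         i = j
--     return None
-- ===== Notes on version B (the rewrite author's own statement) =====
-- stated objective: alternative
-- what changed: B sorts the array and scans runs of equal elements with two index pointers, returning the first singleton run whose value lies in 0..4 (correct because sorted order makes that the smallest qualifying value), instead of A's per-candidate rescan of the array for each i in range(5).
import Mathlib
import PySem

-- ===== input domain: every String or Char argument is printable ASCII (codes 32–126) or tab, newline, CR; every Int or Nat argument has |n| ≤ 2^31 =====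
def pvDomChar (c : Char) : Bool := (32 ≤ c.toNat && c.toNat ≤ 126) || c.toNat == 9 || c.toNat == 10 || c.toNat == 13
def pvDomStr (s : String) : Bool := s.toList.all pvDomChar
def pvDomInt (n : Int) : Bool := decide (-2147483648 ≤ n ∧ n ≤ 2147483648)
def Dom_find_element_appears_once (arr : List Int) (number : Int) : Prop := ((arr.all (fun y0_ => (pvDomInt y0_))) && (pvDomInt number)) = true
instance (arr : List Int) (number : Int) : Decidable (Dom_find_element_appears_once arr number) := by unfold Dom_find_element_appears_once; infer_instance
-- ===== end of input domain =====

-- B sorts the array and scans runs of equal elements instead of A's rescan per candidate (alternative algorithm).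

-- ===== PORT A =====
-- inner loop of A: counter over j in range(len(arr))
def pvCountA (arr : List Int) (i : Int) : Int :=
  (PySem.List.pyRange 0 (PySem.List.len arr) 1).foldl
    (fun c j => if i == PySem.List.pyGetD arr j 0 then c + 1 else c) 0

-- outer loop of A over range(5), with early return
def pvLoopA (arr : List Int) : List Int → Option Int
  | [] => none
  | i :: rest => if pvCountA arr i == 1 then some i else pvLoopA arr rest

def find_element_appears_once (arr : List Int) (_number : Int) : Option Int :=
  pvLoopA arr (PySem.List.pyRange 0 5 1)

-- ===== PORT B =====
-- Source B's inner while loop: advance j while j < n and s[j] == s[i]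
def pvRunEnd (s : List Int) (x : Int) (j : Nat) : Nat :=
  if h : j < s.length then
    if s[j] == x then pvRunEnd s x (j + 1) else j
  else j
termination_by s.length - j

-- cited by pvScanFrom's decreasing_by: the inner loop never moves j backwards
theorem pvRunEnd_ge (s : List Int) (x : Int) : ∀ j, j ≤ pvRunEnd s x j := by
  intro j
  rw [pvRunEnd]
  split
  · split
    · have := pvRunEnd_ge s x (j + 1)
      omega
    · exact le_refl j
  · exact le_refl j
termination_by j => s.length - j

-- Source B's outer while loop over the index i
def pvScanFrom (s : List Int) (i : Nat) : Option Int :=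
  if h : i < s.length then
    let j := pvRunEnd s (s[i]) (i + 1)
    if j == i + 1 && (decide (0 ≤ s[i]) && decide (s[i] ≤ 4)) then some (s[i])
    else pvScanFrom s j
  else none
termination_by s.length - i
decreasing_by
  have := pvRunEnd_ge s (s[i]) (i + 1)
  omega

def find_element_appears_once_alt (arr : List Int) (_number : Int) : Option Int :=
  pvScanFrom (PySem.List.sorted arr (fun x => x) false) 0

-- ===== PRECONDITION & SPEC =====
def Spec_find_element_appears_once (arr : List Int) (number : Int) (out : Option Int) : Prop := out = find_element_appears_once_alt arr number
instance (arr : List Int) (number : Int) (out : Option Int) : Decidable (Spec_find_element_appears_once arr number out) := by unfold Spec_find_element_appears_once; infer_instance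

-- ===== CLAIM (what is proved, stated in full; the proofs are below) =====
def Claim_equal_find_element_appears_once : Prop := ∀ (arr : List Int) (number : Int), Dom_find_element_appears_once arr number → Spec_find_element_appears_once arr number (find_element_appears_once arr number)

-- ===== LEMMAS AND PROOFS =====

-- proof helper: the run scan expressed structurally on the suffix list
def pvScanRuns : List Int → Option Int
  | [] => none
  | x :: rest =>
      let run := rest.takeWhile (fun y => y == x)
      if run.length == 0 && (decide (0 ≤ x) && decide (x ≤ 4)) then some x
      else pvScanRuns (rest.dropWhile (fun y => y == x))
termination_by s => s.length
decreasing_by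
  have := List.length_dropWhile_le (fun y => y == x) rest
  simp; omega

theorem dropWhile_eq_drop_len_takeWhile (p : Int → Bool) (l : List Int) :
    l.dropWhile p = l.drop (l.takeWhile p).length := by
  induction l with
  | nil => rfl
  | cons a t ih =>
    by_cases h : p a = true
    · simp [h, ih]
    · simp [h]

-- the inner index loop reaches the end of the head's run
theorem pvRunEnd_eq (s : List Int) (x : Int) : ∀ j,
    pvRunEnd s x j = j + ((s.drop j).takeWhile (fun y => y == x)).length := by
  intro j
  rw [pvRunEnd]
  split
  · rename_i h
    rw [List.drop_eq_getElem_cons h, List.takeWhile_cons]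
    split
    · rename_i hx
      rw [pvRunEnd_eq s x (j + 1)]
      simp; omega
    · simp
  · rename_i h
    rw [List.drop_of_length_le (by omega)]
    simp
termination_by j => s.length - j

-- the index scan is the structural run scan on the suffix
theorem pvScanFrom_eq (s : List Int) : ∀ i, pvScanFrom s i = pvScanRuns (s.drop i) := by
  intro i
  rw [pvScanFrom]
  split
  · rename_i h
    rw [List.drop_eq_getElem_cons h, pvScanRuns]
    simp only [pvRunEnd_eq s (s[i]) (i + 1)]
    by_cases hrun : (((s.drop (i + 1)).takeWhile (fun y => y == s[i])).length) = 0
    · simp only [hrun, Nat.add_zero, beq_self_eq_true, Bool.true_and]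
      split
      · rfl
      · rw [pvScanFrom_eq s (i + 1), dropWhile_eq_drop_len_takeWhile, hrun, List.drop_zero]
    · have h1 : ((i + 1 + ((s.drop (i + 1)).takeWhile (fun y => y == s[i])).length : Nat) == i + 1) = false := by
        simp only [beq_eq_false_iff_ne, ne_eq]; omega
      have h2 : ((((s.drop (i + 1)).takeWhile (fun y => y == s[i])).length : Nat) == 0) = false := by
        simp only [beq_eq_false_iff_ne, ne_eq]; omega
      rw [h1, h2]
      simp only [Bool.false_and, Bool.false_eq_true, if_false]
      rw [pvScanFrom_eq s (i + 1 + ((s.drop (i + 1)).takeWhile (fun y => y == s[i])).length)]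
      rw [dropWhile_eq_drop_len_takeWhile, List.drop_drop]
  · rename_i h
    rw [List.drop_of_length_le (by omega), pvScanRuns]
termination_by i => s.length - i
decreasing_by
  all_goals omega

-- A's hand-rolled counter is List.count
theorem pvCountA_eq_count (arr : List Int) (i : Int) :
    pvCountA arr i = (arr.count i : Int) := by
  rw [pvCountA, PySem.List.len,
      PySem.List.foldl_pyRange_pyGetD' arr 0 (fun c x => if i == x then c + 1 else c) 0 (by omega)]
  simp only [Int.toNat_zero, List.drop_zero,
    PySem.List.foldl_count_if (fun x => i == x) arr 0, zero_add]
  have hc : List.countP (fun x => i == x) arr = List.countP (fun x => x == i) arr :=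
    List.countP_congr (fun x _ => by simp only [beq_iff_eq]; exact eq_comm)
  rw [List.count, hc]

-- A's early-return loop is List.find?
theorem pvLoopA_eq_find? (arr : List Int) (l : List Int) :
    pvLoopA arr l = l.find? (fun i => (arr.count i : Int) == 1) := by
  induction l with
  | nil => rfl
  | cons i rest ih =>
    simp only [pvLoopA, List.find?, pvCountA_eq_count]
    by_cases h : ((arr.count i : Int) == 1) <;> simp [h, ih]

-- find? on two predicates agreeing on the members of the list
theorem find?_congr_mem {α : Type} {p q : α → Bool} (l : List α)
    (h : ∀ a ∈ l, p a = q a) : l.find? p = l.find? q := by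
  induction l with
  | nil => rfl
  | cons a t ih =>
    simp only [List.find?, h a (List.mem_cons_self)]
    cases q a
    · exact ih fun b hb => h b (List.mem_cons_of_mem _ hb)
    · rfl

-- first match of find? on a ≤-sorted list is minimal among matches
theorem find?_sorted_le {p : Int → Bool} {v : Int} (l : List Int)
    (hl : l.Pairwise (· ≤ ·)) (h : l.find? p = some v) :
    ∀ u ∈ l, p u = true → v ≤ u := by
  induction l with
  | nil => simp at h
  | cons a t ih =>
    rcases List.pairwise_cons.mp hl with ⟨ha, ht⟩
    intro u hu hpu
    by_cases hpa : p a = true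
    · have hv : v = a := by
        have : a = v := by simpa [List.find?, hpa] using h
        omega
      rcases List.mem_cons.mp hu with rfl | hu
      · simp [hv]
      · exact hv ▸ ha u hu
    · have h' : t.find? p = some v := by
        simpa [List.find?, hpa] using h
      rcases List.mem_cons.mp hu with rfl | hu
      · exact absurd hpu hpa
      · exact ih ht h' u hu hpu

-- elements after the head's run in a sorted list are strictly greater than the head
theorem drop_run_gt {x : Int} {rest : List Int}
    (hp : (x :: rest).Pairwise (· ≤ ·)) :
    ∀ u ∈ rest.dropWhile (fun y => y == x), x < u := by
  rcases List.pairwise_cons.mp hp with ⟨hx, hrest⟩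
  intro u hu
  set d := rest.dropWhile (fun y => y == x) with hd
  rcases hdne : d with _ | ⟨y, ds⟩
  · simp [hdne] at hu
  · have hy : ((y == x) : Bool) = false := by
      have hne : List.dropWhile (fun y => y == x) rest ≠ [] := by rw [← hd, hdne]; simp
      have := List.head_dropWhile_not (p := fun y => y == x) (l := rest) hne
      have heq := hd.symm.trans hdne
      simp only [heq, List.head_cons] at this
      exact this
    have hyd : y ∈ d := by rw [hdne]; simp
    have hxy : x ≤ y := hx y ((List.dropWhile_sublist _).subset (hd ▸ hyd))
    have hyx : x < y := by
      have : y ≠ x := by simpa using hy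
      omega
    have hdp : d.Pairwise (· ≤ ·) := hd ▸ (hrest.sublist (List.dropWhile_sublist _))
    rcases List.mem_cons.mp (hdne ▸ hu) with rfl | hu'
    · exact hyx
    · have : y ≤ u := (List.pairwise_cons.mp (hdne ▸ hdp)).1 u hu'
      omega

-- the head's multiplicity in a sorted list is 1 + length of its run in the tail
theorem count_head_run {x : Int} {rest : List Int}
    (hp : (x :: rest).Pairwise (· ≤ ·)) :
    (x :: rest).count x = (rest.takeWhile (fun y => y == x)).length + 1 := by
  have hsplit : rest = rest.takeWhile (fun y => y == x) ++ rest.dropWhile (fun y => y == x) :=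
    (List.takeWhile_append_dropWhile).symm
  have ht : (rest.takeWhile (fun y => y == x)).count x
      = (rest.takeWhile (fun y => y == x)).length := by
    apply List.count_eq_length.mpr
    intro u hu
    have h2 : u = x := by simpa using List.mem_takeWhile_imp hu
    simp [h2]
  have hdz : (rest.dropWhile (fun y => y == x)).count x = 0 := by
    apply List.count_eq_zero.mpr
    intro hmem
    have := drop_run_gt hp x hmem
    omega
  rw [List.count_cons_self, congrArg (List.count x) hsplit, List.count_append, ht, hdz]

-- run-scan on a sorted list = find? of "multiplicity 1 and in 0..4"
theorem pvScanRuns_eq_find?_aux : ∀ (n : Nat) (s : List Int), s.length ≤ n →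
    s.Pairwise (· ≤ ·) →
    pvScanRuns s
      = s.find? (fun u => (s.count u == 1) && (decide (0 ≤ u) && decide (u ≤ 4))) := by
  intro n
  induction n with
  | zero =>
    intro s hlen _
    have : s = [] := List.eq_nil_of_length_eq_zero (by omega)
    subst this; simp [pvScanRuns]
  | succ n ih =>
    intro s hlen hs
    rcases s with _ | ⟨x, rest⟩
    · simp [pvScanRuns]
    rw [pvScanRuns]
    by_cases hcond : ((rest.takeWhile (fun y => y == x)).length == 0
        && (decide (0 ≤ x) && decide (x ≤ 4))) = true
    · -- early-return branch: the head itself qualifies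
      rw [if_pos hcond]
      obtain ⟨hrun0, hx⟩ := Bool.and_eq_true_iff.mp hcond
      have hc1 : (x :: rest).count x = 1 := by
        rw [count_head_run hs]
        have : (rest.takeWhile (fun y => y == x)).length = 0 := by simpa using hrun0
        omega
      rw [List.find?_cons_of_pos]
      rw [hc1, hx]; rfl
    · rw [if_neg (by simpa using hcond)]
      have hrest : rest.Pairwise (· ≤ ·) := (List.pairwise_cons.mp hs).2
      have hd : (rest.dropWhile (fun y => y == x)).Pairwise (· ≤ ·) :=
        hrest.sublist (List.dropWhile_sublist _)
      have hdlen : (rest.dropWhile (fun y => y == x)).length ≤ n := by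
        have := List.length_dropWhile_le (fun y => y == x) rest
        simp at hlen; omega
      rw [ih _ hdlen hd]
      -- the count inside the drop equals the count in the whole sorted list, on drop's members
      have hcnt : ∀ u ∈ rest.dropWhile (fun y => y == x),
          (x :: rest).count u = (rest.dropWhile (fun y => y == x)).count u := by
        intro u hu
        have hgt := drop_run_gt hs u hu
        have hsplit : rest = rest.takeWhile (fun y => y == x) ++ rest.dropWhile (fun y => y == x) :=
          (List.takeWhile_append_dropWhile).symm
        have htk : (rest.takeWhile (fun y => y == x)).count u = 0 := by
          apply List.count_eq_zero.mpr
          intro hmem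
          have := List.mem_takeWhile_imp hmem
          have : u = x := by simpa using this
          omega
        have hx0 : x ≠ u := by omega
        rw [List.count_cons_of_ne (by omega), congrArg (List.count u) hsplit,
            List.count_append, htk, Nat.zero_add]
      have hfc : (rest.dropWhile (fun y => y == x)).find?
            (fun u => (((rest.dropWhile (fun y => y == x)).count u : Nat) == 1)
              && (decide (0 ≤ u) && decide (u ≤ 4)))
          = (rest.dropWhile (fun y => y == x)).find?
            (fun u => (((x :: rest).count u : Nat) == 1) && (decide (0 ≤ u) && decide (u ≤ 4))) :=
        find?_congr_mem _ (fun u hu => by rw [hcnt u hu])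
      rw [hfc]
      -- the head and its run all fail the predicate on x::rest
      have hPfail : ∀ u, u = x ∨ u ∈ rest.takeWhile (fun y => y == x) →
          (((x :: rest).count u == 1) && (decide (0 ≤ u) && decide (u ≤ 4))) = false := by
        intro u hu
        have hux : u = x := by
          rcases hu with rfl | hu
          · rfl
          · simpa using List.mem_takeWhile_imp hu
        subst hux
        by_cases hrng : (decide (0 ≤ u) && decide (u ≤ 4)) = true
        · -- the branch was not taken, so the run is nonempty and the count is ≥ 2
          have hrunne : (rest.takeWhile (fun y => y == u)).length ≠ 0 := by
            intro h0
            exact hcond (by simp [h0, hrng])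
          have hcu := count_head_run hs
          have hc : (((u :: rest).count u : Nat) == 1) = false := by
            simp only [beq_eq_false_iff_ne, ne_eq]
            omega
          simp only [hc, Bool.false_and]
        · simp only [Bool.and_eq_true, decide_eq_true_eq, not_and] at hrng
          simp only [Bool.and_eq_false_iff, decide_eq_false_iff_not]
          by_cases h0 : 0 ≤ u
          · right; right; exact hrng h0
          · right; left; exact h0
      -- walk find? past the head and past its run
      have hsplit : rest = rest.takeWhile (fun y => y == x) ++ rest.dropWhile (fun y => y == x) :=
        (List.takeWhile_append_dropWhile).symm
      have hstep : List.find?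
            (fun u => (((x :: rest).count u : Nat) == 1) && (decide (0 ≤ u) && decide (u ≤ 4)))
            (x :: rest)
          = List.find?
            (fun u => (((x :: rest).count u : Nat) == 1) && (decide (0 ≤ u) && decide (u ≤ 4)))
            rest :=
        List.find?_cons_of_neg (by rw [hPfail x (Or.inl rfl)]; simp)
      rw [hstep, congrArg (List.find?
        (fun u => (((x :: rest).count u : Nat) == 1) && (decide (0 ≤ u) && decide (u ≤ 4)))) hsplit,
        List.find?_append]
      have hnone : (rest.takeWhile (fun y => y == x)).find?
          (fun u => (((x :: rest).count u : Nat) == 1) && (decide (0 ≤ u) && decide (u ≤ 4))) = none := by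
        apply List.find?_eq_none.mpr
        intro u hu
        simp [hPfail u (Or.inr hu)]
      rw [hnone, Option.none_or]

theorem pvScanRuns_eq_find? (s : List Int) (hs : s.Pairwise (· ≤ ·)) :
    pvScanRuns s
      = s.find? (fun u => (s.count u == 1) && (decide (0 ≤ u) && decide (u ≤ 4))) :=
  pvScanRuns_eq_find?_aux s.length s (le_refl _) hs

-- ===== VERDICT (by name: the statement is the Claim_ definition above) =====
theorem find_element_appears_once_spec : Claim_equal_find_element_appears_once := by
  intro arr number _
  show _ = _
  set s := PySem.List.sorted arr (fun x => x) false with hsdef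
  have hperm : s.Perm arr := PySem.List.sorted_perm arr (fun x => x) false
  have hs : s.Pairwise (· ≤ ·) := PySem.List.sorted_pairwise arr (fun x => x)
  rw [find_element_appears_once, find_element_appears_once_alt, pvLoopA_eq_find?,
      ← hsdef, pvScanFrom_eq s 0, List.drop_zero, pvScanRuns_eq_find? s hs]
  have hR : PySem.List.pyRange 0 5 1 = [0, 1, 2, 3, 4] := by decide
  rw [hR]
  have hcount : ∀ v : Int, s.count v = arr.count v := fun v => hperm.count_eq v
  -- both sides compute the least v with arr.count v = 1 and 0 ≤ v ≤ 4
  rcases h1 : List.find? (fun i => ((arr.count i : Int) == 1)) [0, 1, 2, 3, 4] with _ | v1 <;>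
    rcases h2 : s.find? (fun u => (s.count u == 1) && (decide (0 ≤ u) && decide (u ≤ 4))) with _ | v2
  · rfl
  · -- A none, B some: contradiction
    exfalso
    have hp2 := List.find?_some h2
    obtain ⟨hc2, hrng⟩ := Bool.and_eq_true_iff.mp hp2
    have hc2' : arr.count v2 = 1 := by rw [← hcount]; simpa using hc2
    have hrng' : 0 ≤ v2 ∧ v2 ≤ 4 := by simpa [Bool.and_eq_true_iff] using hrng
    have hmemR : v2 ∈ ([0, 1, 2, 3, 4] : List Int) := by
      simp only [List.mem_cons, List.not_mem_nil, or_false]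
      omega
    have := List.find?_eq_none.mp h1 v2 hmemR
    simp [hc2'] at this
  · -- A some, B none: contradiction
    exfalso
    have hp1 := List.find?_some h1
    have hm1 := List.mem_of_find?_eq_some h1
    have hc1 : arr.count v1 = 1 := by simpa using hp1
    have hrng : 0 ≤ v1 ∧ v1 ≤ 4 := by
      simp only [List.mem_cons, List.not_mem_nil, or_false] at hm1
      rcases hm1 with rfl | rfl | rfl | rfl | rfl <;> omega
    have hmem : v1 ∈ s := hperm.mem_iff.mpr (List.count_pos_iff.mp (by omega))
    have := List.find?_eq_none.mp h2 v1 hmem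
    rw [hcount] at this
    simp [hc1, hrng.1, hrng.2] at this
  · -- both some: each minimal over the same set
    have hp1 := List.find?_some h1
    have hm1 := List.mem_of_find?_eq_some h1
    have hp2 := List.find?_some h2
    have hm2 := List.mem_of_find?_eq_some h2
    have hc1 : arr.count v1 = 1 := by simpa using hp1
    obtain ⟨hc2b, hrng2b⟩ := Bool.and_eq_true_iff.mp hp2
    have hc2 : arr.count v2 = 1 := by rw [← hcount]; simpa using hc2b
    have hrng2 : 0 ≤ v2 ∧ v2 ≤ 4 := by simpa [Bool.and_eq_true_iff] using hrng2b
    have hrng1 : 0 ≤ v1 ∧ v1 ≤ 4 := by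
      simp only [List.mem_cons, List.not_mem_nil, or_false] at hm1
      rcases hm1 with rfl | rfl | rfl | rfl | rfl <;> omega
    have hRp : ([0, 1, 2, 3, 4] : List Int).Pairwise (· ≤ ·) := by decide
    have h12 : v1 ≤ v2 := by
      apply find?_sorted_le _ hRp h1 v2
      · simp only [List.mem_cons, List.not_mem_nil, or_false]; omega
      · simp [hc2]
    have h21 : v2 ≤ v1 := by
      apply find?_sorted_le _ hs h2 v1
      · exact hperm.mem_iff.mpr (List.count_pos_iff.mp (by omega))
      · rw [hcount]; simp [hc1, hrng1.1, hrng1.2]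
    have : v1 = v2 := le_antisymm h12 h21
    rw [this]
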